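-- pv_equiv track=rewrite | github.com/Foundup/Foundups-Agent | modules/development/cursor_multi_agent_bridge/src/cursor_subagent_integration.py | _generate_task_recommendations
-- ===== SOURCE A (Python) =====
-- from typing import Dict, Any, List, Optional, Callable
--
-- def _generate_task_recommendations(task_description: str, required_agents: List[str]) -> List[str]:
--     """Generate recommendations for task execution"""
--     recommendations = []
--
--     # Check if compliance agent is included for WSP tasks
--     if any(keyword in task_description.lower() for keyword in ["wsp", "compliance", "protocol"]):
--         if "wsp_compliance" not in required_agents:
--             recommendations.append("Consider including WSP Compliance Specialist for protocol validation")
--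
--     # Check if documentation agent is included for code changes
--     if any(keyword in task_description.lower() for keyword in ["implement", "create", "modify", "update"]):
--         if "documentation" not in required_agents:
--             recommendations.append("Consider including Documentation Specialist for ModLog updates")
--
--     # Check if testing agent is included for new features
--     if any(keyword in task_description.lower() for keyword in ["feature", "function", "class", "method"]):
--         if "testing" not in required_agents:
--             recommendations.append("Consider including Testing Specialist for test coverage")
--
--     return recommendations
-- ===== SOURCE B (Python) =====
-- _KEYWORDS = [
--     ("wsp", 0), ("compliance", 0), ("protocol", 0),
--     ("implement", 1), ("create", 1), ("modify", 1), ("update", 1),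
--     ("feature", 2), ("function", 2), ("class", 2), ("method", 2),
-- ]
-- _AGENT_MSG = [
--     ("wsp_compliance", "Consider including WSP Compliance Specialist for protocol validation"),
--     ("documentation", "Consider including Documentation Specialist for ModLog updates"),
--     ("testing", "Consider including Testing Specialist for test coverage"),
-- ]
--
-- def _generate_task_recommendations(task_description, required_agents):
--     # Single left-to-right scan over the text: at each position mark which
--     # keyword groups have a keyword starting there (multi-pattern matching),
--     # then emit the messages of the triggered groups whose agent is missing.
--     desc = task_description.lower()
--     hit = [False, False, False]
--     for i in range(len(desc) + 1):
--         for kw, grp in _KEYWORDS: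
--             if desc.startswith(kw, i):
--                 hit[grp] = True
--     return [msg for idx, (agent, msg) in enumerate(_AGENT_MSG)
--             if hit[idx] and agent not in required_agents]
-- ===== Notes on version B (the rewrite author's own statement) =====
-- stated objective: alternative
-- what changed: Instead of per-keyword substring membership tests in three if-blocks, B lowers the text once and does a single left-to-right scan over text positions, marking at each position which keyword group has a keyword starting there, then emits messages for triggered groups whose agent is missing.
import Mathlib
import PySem

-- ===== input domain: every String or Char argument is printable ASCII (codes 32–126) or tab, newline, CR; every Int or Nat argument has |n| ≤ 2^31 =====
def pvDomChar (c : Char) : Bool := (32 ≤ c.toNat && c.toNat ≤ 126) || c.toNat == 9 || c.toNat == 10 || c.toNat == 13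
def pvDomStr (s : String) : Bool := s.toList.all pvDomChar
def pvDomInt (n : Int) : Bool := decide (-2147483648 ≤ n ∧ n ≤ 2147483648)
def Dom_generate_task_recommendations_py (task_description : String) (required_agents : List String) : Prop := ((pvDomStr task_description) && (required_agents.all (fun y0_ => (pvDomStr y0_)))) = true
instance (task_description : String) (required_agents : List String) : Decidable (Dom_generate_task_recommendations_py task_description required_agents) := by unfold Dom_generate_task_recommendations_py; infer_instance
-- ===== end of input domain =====

-- B replaces the three per-keyword substring-membership if-blocks by a single positional
-- scan of the lowered text marking triggered keyword groups; same return value (alternative).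
-- ===== PORT A =====
def generate_task_recommendations_py (task_description : String) (required_agents : List String) : List String :=
  let recommendations : List String := []
  let recommendations :=
    if (["wsp", "compliance", "protocol"].any fun keyword => PySem.Str.isIn keyword (PySem.Str.lower task_description)) then
      (if !(required_agents.contains "wsp_compliance") then
        recommendations ++ ["Consider including WSP Compliance Specialist for protocol validation"]
      else recommendations)
    else recommendations
  let recommendations :=
    if (["implement", "create", "modify", "update"].any fun keyword => PySem.Str.isIn keyword (PySem.Str.lower task_description)) then
      (if !(required_agents.contains "documentation") then
        recommendations ++ ["Consider including Documentation Specialist for ModLog updates"]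
      else recommendations)
    else recommendations
  let recommendations :=
    if (["feature", "function", "class", "method"].any fun keyword => PySem.Str.isIn keyword (PySem.Str.lower task_description)) then
      (if !(required_agents.contains "testing") then
        recommendations ++ ["Consider including Testing Specialist for test coverage"]
      else recommendations)
    else recommendations
  recommendations

-- ===== PORT B =====
def pvKeywords : List (List Char × Nat) :=
  [ ("wsp".toList, 0), ("compliance".toList, 0), ("protocol".toList, 0),
    ("implement".toList, 1), ("create".toList, 1), ("modify".toList, 1), ("update".toList, 1),
    ("feature".toList, 2), ("function".toList, 2), ("class".toList, 2), ("method".toList, 2) ]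

def pvAgentMsg : List (String × String) :=
  [ ("wsp_compliance", "Consider including WSP Compliance Specialist for protocol validation"),
    ("documentation", "Consider including Documentation Specialist for ModLog updates"),
    ("testing", "Consider including Testing Specialist for test coverage") ]

-- hit[grp] = True for grp in {0,1,2}; the triple's components are the three list cells
def pvSetHit (grp : Nat) (hit : Bool × Bool × Bool) : Bool × Bool × Bool :=
  match grp with
  | 0 => (true, hit.2.1, hit.2.2)
  | 1 => (hit.1, true, hit.2.2)
  | _ => (hit.1, hit.2.1, true)

-- desc.startswith(kw, i) with 0 ≤ i ≤ len(desc): exact as kw.isPrefixOf (desc.drop i)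
def pvScan (cs : List Char) : Bool × Bool × Bool :=
  (List.range (cs.length + 1)).foldl
    (fun hit i =>
      pvKeywords.foldl
        (fun hit kw => if kw.1.isPrefixOf (cs.drop i) then pvSetHit kw.2 hit else hit)
        hit)
    (false, false, false)

def generate_task_recommendations_py_alt (task_description : String) (required_agents : List String) : List String :=
  let desc := PySem.Str.lower task_description
  let hit := pvScan desc.toList
  ((PySem.List.enumerate pvAgentMsg).filter
      (fun p => (if p.1 == 0 then hit.1 else if p.1 == 1 then hit.2.1 else hit.2.2)
                && !(required_agents.contains p.2.1))).map
    (fun p => p.2.2)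

-- ===== PRECONDITION & SPEC =====
def Spec_generate_task_recommendations_py (task_description : String) (required_agents : List String) (out : List String) : Prop := out = generate_task_recommendations_py_alt task_description required_agents
instance (task_description : String) (required_agents : List String) (out : List String) : Decidable (Spec_generate_task_recommendations_py task_description required_agents out) := by unfold Spec_generate_task_recommendations_py; infer_instance

-- ===== CLAIM (what is proved, stated in full; the proofs are below) =====
def Claim_equal_generate_task_recommendations_py : Prop := ∀ (task_description : String) (required_agents : List String), Dom_generate_task_recommendations_py task_description required_agents → Spec_generate_task_recommendations_py task_description required_agents (generate_task_recommendations_py task_description required_agents)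

-- ===== LEMMAS AND PROOFS =====

-- inner loop over the keyword table: each component becomes "old ∨ some keyword of that group matches here"
lemma pv_inner (kws : List (List Char × Nat)) (t : List Char) (hit : Bool × Bool × Bool) :
    kws.foldl (fun hit kw => if kw.1.isPrefixOf t then pvSetHit kw.2 hit else hit) hit =
      (hit.1 || kws.any (fun kw => kw.2 == 0 && kw.1.isPrefixOf t),
       hit.2.1 || kws.any (fun kw => kw.2 == 1 && kw.1.isPrefixOf t),
       hit.2.2 || kws.any (fun kw => (2 ≤ kw.2 : Bool) && kw.1.isPrefixOf t)) := by
  induction kws generalizing hit with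
  | nil => simp
  | cons kw rest ih =>
    rw [List.foldl_cons, ih]
    by_cases hp : kw.1.isPrefixOf t
    · match h : kw.2 with
      | 0 => simp [pvSetHit, hp, h]
      | 1 => simp [pvSetHit, hp, h]
      | (n+2) => simp [pvSetHit, hp, h]
    · simp [hp]

-- outer loop over positions: each component becomes "some position triggers that group"
lemma pv_outer (l : List Nat) (cs : List Char) (hit : Bool × Bool × Bool) :
    l.foldl (fun hit i => pvKeywords.foldl
        (fun hit kw => if kw.1.isPrefixOf (cs.drop i) then pvSetHit kw.2 hit else hit) hit) hit =
      (hit.1 || l.any (fun i => pvKeywords.any (fun kw => kw.2 == 0 && kw.1.isPrefixOf (cs.drop i))),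
       hit.2.1 || l.any (fun i => pvKeywords.any (fun kw => kw.2 == 1 && kw.1.isPrefixOf (cs.drop i))),
       hit.2.2 || l.any (fun i => pvKeywords.any (fun kw => (2 ≤ kw.2 : Bool) && kw.1.isPrefixOf (cs.drop i)))) := by
  induction l generalizing hit with
  | nil => simp
  | cons i rest ih =>
    rw [List.foldl_cons, pv_inner, ih]
    simp [Bool.or_assoc]

lemma pv_any_false {α : Type} (l : List α) : (l.any fun _ => false) = false := by
  simp [List.any_eq_false]

-- Bool-valued "or" distributes over any
lemma pv_any_or {α : Type} (l : List α) (f g : α → Bool) :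
    (l.any fun x => f x || g x) = (l.any f || l.any g) := by
  induction l with
  | nil => simp
  | cons a l ih => simp [ih]; ac_rfl

-- a prefix occurrence at ANY offset is one at an offset ≤ length (drop saturates at [])
lemma pv_bound (cs k : List Char) :
    (∃ i, i ∈ List.range (cs.length + 1) ∧ k.isPrefixOf (cs.drop i)) ↔ ∃ j, k <+: cs.drop j := by
  constructor
  · rintro ⟨i, _, h⟩; exact ⟨i, List.isPrefixOf_iff_prefix.mp h⟩
  · rintro ⟨j, h⟩
    by_cases hj : j ≤ cs.length
    · exact ⟨j, List.mem_range.mpr (by omega), List.isPrefixOf_iff_prefix.mpr h⟩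
    · refine ⟨cs.length, List.mem_range.mpr (by omega), List.isPrefixOf_iff_prefix.mpr ?_⟩
      rw [List.drop_eq_nil_of_le (by omega)] at h ⊢
      exact h

-- per keyword: the scan sees it iff Python's "kw in desc" is true
lemma pv_kw (cs k : List Char) :
    (List.range (cs.length + 1)).any (fun i => k.isPrefixOf (cs.drop i)) =
      PySem.Chars.isIn k cs := by
  rw [Bool.eq_iff_iff, List.any_eq_true, ← PySem.Chars.exists_prefix_drop_iff_isIn]
  exact pv_bound cs k

-- the scan's three flags are exactly A's three `any(keyword in desc)` conditions
lemma pv_scan_eq (cs : List Char) :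
    pvScan cs =
      (PySem.Chars.isIn "wsp".toList cs || PySem.Chars.isIn "compliance".toList cs || PySem.Chars.isIn "protocol".toList cs,
       PySem.Chars.isIn "implement".toList cs || PySem.Chars.isIn "create".toList cs || PySem.Chars.isIn "modify".toList cs || PySem.Chars.isIn "update".toList cs,
       PySem.Chars.isIn "feature".toList cs || PySem.Chars.isIn "function".toList cs || PySem.Chars.isIn "class".toList cs || PySem.Chars.isIn "method".toList cs) := by
  unfold pvScan
  rw [pv_outer]
  simp only [pvKeywords, List.any_cons, List.any_nil, Bool.or_false, Bool.false_or]
  norm_num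
  simp only [pv_any_or, pv_kw]
  refine ⟨?_, ?_, ?_⟩ <;> simp [pv_any_false, Bool.or_assoc]

-- ===== VERDICT (by name: the statement is the Claim_ definition above) =====
-- proof-only abstractions of the two assemblies over the six governing Booleans
def pvA (c1 c2 c3 m1 m2 m3 : Bool) : List String :=
  let recommendations : List String := []
  let recommendations :=
    if c1 then
      (if !m1 then recommendations ++ ["Consider including WSP Compliance Specialist for protocol validation"]
       else recommendations)
    else recommendations
  let recommendations :=
    if c2 then
      (if !m2 then recommendations ++ ["Consider including Documentation Specialist for ModLog updates"]
       else recommendations)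
    else recommendations
  let recommendations :=
    if c3 then
      (if !m3 then recommendations ++ ["Consider including Testing Specialist for test coverage"]
       else recommendations)
    else recommendations
  recommendations

def pvB2 (c1 c2 c3 : Bool) (required_agents : List String) : List String :=
  ((PySem.List.enumerate pvAgentMsg).filter
      (fun p => (if p.1 == 0 then c1 else if p.1 == 1 then c2 else c3)
                && !(required_agents.contains p.2.1))).map
    (fun p => p.2.2)

lemma pvA_form (td : String) (ra : List String) :
    generate_task_recommendations_py td ra =
      pvA (["wsp", "compliance", "protocol"].any fun keyword => PySem.Str.isIn keyword (PySem.Str.lower td))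
          (["implement", "create", "modify", "update"].any fun keyword => PySem.Str.isIn keyword (PySem.Str.lower td))
          (["feature", "function", "class", "method"].any fun keyword => PySem.Str.isIn keyword (PySem.Str.lower td))
          (ra.contains "wsp_compliance") (ra.contains "documentation") (ra.contains "testing") := rfl

lemma pvB_form (td : String) (ra : List String) :
    generate_task_recommendations_py_alt td ra =
      pvB2 (PySem.Chars.isIn "wsp".toList (PySem.Str.lower td).toList || PySem.Chars.isIn "compliance".toList (PySem.Str.lower td).toList || PySem.Chars.isIn "protocol".toList (PySem.Str.lower td).toList)
           (PySem.Chars.isIn "implement".toList (PySem.Str.lower td).toList || PySem.Chars.isIn "create".toList (PySem.Str.lower td).toList || PySem.Chars.isIn "modify".toList (PySem.Str.lower td).toList || PySem.Chars.isIn "update".toList (PySem.Str.lower td).toList)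
           (PySem.Chars.isIn "feature".toList (PySem.Str.lower td).toList || PySem.Chars.isIn "function".toList (PySem.Str.lower td).toList || PySem.Chars.isIn "class".toList (PySem.Str.lower td).toList || PySem.Chars.isIn "method".toList (PySem.Str.lower td).toList)
           ra := by
  unfold generate_task_recommendations_py_alt pvB2
  simp only [pv_scan_eq, Bool.or_assoc]

lemma pv_assemble (c1 c2 c3 : Bool) (ra : List String) :
    pvA c1 c2 c3 (ra.contains "wsp_compliance") (ra.contains "documentation") (ra.contains "testing") =
      pvB2 c1 c2 c3 ra := by
  cases c1 <;> cases c2 <;> cases c3 <;>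
  cases hm1 : ra.contains "wsp_compliance" <;>
  cases hm2 : ra.contains "documentation" <;>
  cases hm3 : ra.contains "testing" <;>
  simp [pvA, pvB2, pvAgentMsg, PySem.List.enumerate_cons, PySem.List.enumerate_nil,
    List.filter_cons, List.filter_nil, hm1, hm2, hm3] <;> simp_all

-- ===== VERDICT (by name: the statement is the Claim_ definition above) =====
theorem generate_task_recommendations_py_spec : Claim_equal_generate_task_recommendations_py := by
  intro task_description required_agents _
  unfold Spec_generate_task_recommendations_py
  rw [pvA_form, pvB_form, ← pv_assemble]
  simp [Bool.or_assoc]
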